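-- pv_equiv track=rewrite | github.com/Restimon/Bot | cogs/combat.py | _mentionize_ids
-- ===== SOURCE A (Python) =====
-- def _mentionize_ids(text: str) -> str:
--     # remplace @123456789 -> <@123456789>
--     out = []
--     i = 0
--     while i < len(text):
--         ch = text[i]
--         if ch == "@" and i + 1 < len(text) and text[i + 1].isdigit():
--             j = i + 1
--             while j < len(text) and text[j].isdigit():
--                 j += 1
--             uid = text[i + 1 : j]
--             out.append(f"<@{uid}>")
--             i = j
--             continue
--         out.append(ch)
--         i += 1
--     return "".join(out)
-- ===== SOURCE B (Python) =====
-- def _mentionize_ids(text: str) -> str: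
--     # tokenize on '@' and classify each token, instead of walking an index
--     first, *rest = text.split('@')
--     pieces = [first]
--     for seg in rest:
--         n = 0
--         while n < len(seg) and seg[n].isdigit():
--             n += 1
--         pieces.append('<@' + seg[:n] + '>' + seg[n:] if n else '@' + seg)
--     return ''.join(pieces)
-- ===== Notes on version B (the rewrite author's own statement) =====
-- stated objective: faster
-- what changed: B tokenizes the text on the at-sign delimiter with str.split and classifies each subsequent segment by its maximal digit prefix, instead of A's character-by-character index walk in a Python-level while loop; the split and slicing run in C, giving a large constant-factor speedup.
import Mathlib
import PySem

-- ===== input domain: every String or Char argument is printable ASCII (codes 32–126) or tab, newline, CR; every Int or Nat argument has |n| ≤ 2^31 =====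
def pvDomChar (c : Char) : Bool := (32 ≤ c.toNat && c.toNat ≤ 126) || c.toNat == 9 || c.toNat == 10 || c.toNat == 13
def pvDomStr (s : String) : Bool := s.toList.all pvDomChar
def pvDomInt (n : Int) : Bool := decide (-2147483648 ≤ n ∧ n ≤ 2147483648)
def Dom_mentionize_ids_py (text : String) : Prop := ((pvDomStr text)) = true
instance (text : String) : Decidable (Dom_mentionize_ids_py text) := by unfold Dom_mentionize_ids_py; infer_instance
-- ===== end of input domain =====

-- B tokenizes on '@' and classifies each token instead of walking one index through the string (measured faster in Python by a constant factor; same O(n) asymptotics).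

-- ===== PORT A =====
-- A's inner `while j … j += 1` digit scan: returns (the digit run, the remainder)
def pvScanDigits : List Char → List Char × List Char
  | [] => ([], [])
  | c :: cs =>
    if PySem.Chars.isdigit c then
      let p := pvScanDigits cs
      (c :: p.1, p.2)
    else ([], c :: cs)

-- A's guard `i + 1 < len(text) and text[i + 1].isdigit()` on the remaining suffix
def pvHeadDigit : List Char → Bool
  | [] => false
  | d :: _ => PySem.Chars.isdigit d

-- termination fact for A's outer loop (i jumps forward to j, never backwards)
theorem pvScanDigits_snd_length_le (cs : List Char) : (pvScanDigits cs).2.length ≤ cs.length := by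
  induction cs with
  | nil => simp [pvScanDigits]
  | cons c cs ih =>
    simp only [pvScanDigits]
    split
    · simpa using Nat.le_succ_of_le ih
    · simp

-- A's outer `while i < len(text)` loop, position i represented by the remaining suffix
def pvALoop : List Char → List Char
  | [] => []
  | c :: cs =>
    if c = '@' ∧ pvHeadDigit cs = true then
      '<' :: '@' :: ((pvScanDigits cs).1 ++ '>' :: pvALoop (pvScanDigits cs).2)
    else
      c :: pvALoop cs
termination_by cs => cs.length
decreasing_by
  · exact Nat.lt_succ_of_le (pvScanDigits_snd_length_le cs)
  · simp

def mentionize_ids_py (text : String) : String := String.ofList (pvALoop text.toList)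

-- ===== PORT B =====
-- B's inner `while n < len(seg) and seg[n].isdigit(): n += 1` counter
def pvDigitPrefixLen : List Char → Nat
  | [] => 0
  | c :: cs => if PySem.Chars.isdigit c then pvDigitPrefixLen cs + 1 else 0

-- the piece appended for one post-'@' segment
def pvPiece (seg : List Char) : List Char :=
  let n := pvDigitPrefixLen seg
  if n ≠ 0 then '<' :: '@' :: (seg.take n ++ '>' :: seg.drop n) else '@' :: seg

def mentionize_ids_py_alt (text : String) : String :=
  match text.toList.splitOn '@' with
  | [] => ""   -- unreachable: split never returns an empty list
  | first :: rest => String.ofList (rest.foldl (fun acc seg => acc ++ pvPiece seg) first)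

-- ===== PRECONDITION & SPEC =====
def Spec_mentionize_ids_py (text : String) (out : String) : Prop := out = mentionize_ids_py_alt text
instance (text : String) (out : String) : Decidable (Spec_mentionize_ids_py text out) := by unfold Spec_mentionize_ids_py; infer_instance

-- ===== CLAIM (what is proved, stated in full; the proofs are below) =====
def Claim_equal_mentionize_ids_py : Prop := ∀ (text : String), Dom_mentionize_ids_py text → Spec_mentionize_ids_py text (mentionize_ids_py text)

-- ===== LEMMAS AND PROOFS =====

-- proof-side view of B's result on a character list
def pvB (cs : List Char) : List Char :=
  (cs.splitOn '@').headI ++ (cs.splitOn '@').tail.flatMap pvPiece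

theorem pvSplitOn_ne_nil (cs : List Char) : cs.splitOn '@' ≠ [] := by
  simp [List.splitOn, List.splitOnP_ne_nil]

theorem pvSplitOn_cons (c : Char) (cs : List Char) :
    (c :: cs).splitOn '@' =
      if c = '@' then [] :: cs.splitOn '@' else (cs.splitOn '@').modifyHead (c :: ·) := by
  simp [List.splitOn, List.splitOnP_cons]

theorem pvB_nil : pvB [] = [] := by
  simp [pvB, List.splitOn_nil]

theorem pvB_cons_ne (c : Char) (cs : List Char) (h : c ≠ '@') :
    pvB (c :: cs) = c :: pvB cs := by
  obtain ⟨f, rest, hfr⟩ := List.exists_cons_of_ne_nil (pvSplitOn_ne_nil cs)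
  simp [pvB, pvSplitOn_cons, h, hfr]

theorem pvB_cons_at (cs : List Char) :
    pvB ('@' :: cs) = pvPiece ((cs.splitOn '@').headI) ++ (cs.splitOn '@').tail.flatMap pvPiece := by
  obtain ⟨f, rest, hfr⟩ := List.exists_cons_of_ne_nil (pvSplitOn_ne_nil cs)
  simp [pvB, pvSplitOn_cons, hfr]

theorem pvIsdigit_ne_at {c : Char} (h : PySem.Chars.isdigit c = true) : c ≠ '@' := by
  intro hc; subst hc; simp [PySem.Chars.isdigit] at h

theorem pvSplitOn_digits_append (u r : List Char) (hu : ∀ c ∈ u, PySem.Chars.isdigit c = true) :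
    (u ++ r).splitOn '@' = (r.splitOn '@').modifyHead (u ++ ·) := by
  induction u with
  | nil =>
    obtain ⟨f, rest, hfr⟩ := List.exists_cons_of_ne_nil (pvSplitOn_ne_nil r)
    simp [hfr]
  | cons c u ih =>
    have hc : c ≠ '@' := pvIsdigit_ne_at (hu c (by simp))
    have ih' := ih (fun d hd => hu d (by simp [hd]))
    obtain ⟨f, rest, hfr⟩ := List.exists_cons_of_ne_nil (pvSplitOn_ne_nil r)
    simp [pvSplitOn_cons, hc, ih', hfr]

theorem pvDigitPrefixLen_append (u v : List Char) (hu : ∀ c ∈ u, PySem.Chars.isdigit c = true) :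
    pvDigitPrefixLen (u ++ v) = u.length + pvDigitPrefixLen v := by
  induction u with
  | nil => simp
  | cons c u ih =>
    have hc := hu c (by simp)
    have ih' := ih (fun d hd => hu d (by simp [hd]))
    simp [pvDigitPrefixLen, hc, ih']
    omega

-- the first '@'-segment of cs starts with cs's head character (or is empty / cut by '@')
theorem pvDpl_head_splitOn (cs : List Char) (h : pvHeadDigit cs = false) :
    pvDigitPrefixLen ((cs.splitOn '@').headI) = 0 := by
  cases cs with
  | nil => simp [List.splitOn_nil, pvDigitPrefixLen]
  | cons e cs =>
    by_cases he : e = '@'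
    · simp [pvSplitOn_cons, he, pvDigitPrefixLen]
    · obtain ⟨f, rest, hfr⟩ := List.exists_cons_of_ne_nil (pvSplitOn_ne_nil cs)
      simp only [pvHeadDigit] at h
      simp [pvSplitOn_cons, he, hfr, pvDigitPrefixLen, h]

theorem pvHeadDigit_dropWhile (cs : List Char) :
    pvHeadDigit (cs.dropWhile PySem.Chars.isdigit) = false := by
  induction cs with
  | nil => simp [pvHeadDigit]
  | cons c cs ih =>
    by_cases h : PySem.Chars.isdigit c
    · simpa [h] using ih
    · simp [h, pvHeadDigit]

theorem pvScanDigits_eq (cs : List Char) :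
    pvScanDigits cs = (cs.takeWhile PySem.Chars.isdigit, cs.dropWhile PySem.Chars.isdigit) := by
  induction cs with
  | nil => simp [pvScanDigits]
  | cons c cs ih =>
    by_cases hc : PySem.Chars.isdigit c
    · simp [pvScanDigits, hc, ih, List.takeWhile_cons_of_pos]
    · simp [pvScanDigits, hc, List.takeWhile]

-- the main equivalence, by strong induction on the length of the suffix
theorem pvMain : ∀ (n : Nat) (cs : List Char), cs.length ≤ n → pvALoop cs = pvB cs := by
  intro n
  induction n with
  | zero =>
    intro cs h
    have : cs = [] := List.eq_nil_of_length_eq_zero (Nat.le_zero.mp h)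
    subst this
    simp [pvALoop, pvB_nil]
  | succ n ih =>
    intro cs hlen
    match cs with
    | [] => simp [pvALoop, pvB_nil]
    | c :: cs =>
      have hcs : cs.length ≤ n := by simpa using hlen
      by_cases hc : c = '@'
      · subst hc
        by_cases hd : pvHeadDigit cs = true
        · -- digit run after '@'
          have hscan : pvScanDigits cs =
              (cs.takeWhile PySem.Chars.isdigit, cs.dropWhile PySem.Chars.isdigit) :=
            pvScanDigits_eq cs
          set u := cs.takeWhile PySem.Chars.isdigit with hu
          set r := cs.dropWhile PySem.Chars.isdigit with hr
          have hur : u ++ r = cs := List.takeWhile_append_dropWhile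
          have hudig : ∀ x ∈ u, PySem.Chars.isdigit x = true := fun x hx =>
            List.mem_takeWhile_imp (hu ▸ hx)
          have hune : u ≠ [] := by
            cases hcase : cs with
            | nil => rw [hcase] at hd; simp [pvHeadDigit] at hd
            | cons d cs' =>
              rw [hcase] at hd
              simp only [pvHeadDigit] at hd
              rw [hu, hcase, List.takeWhile_cons_of_pos hd]
              simp
          have hrlen : r.length ≤ n := by
            have h1 : r.length ≤ cs.length := by
              conv_rhs => rw [← hur]
              simp
            omega
          have hrhead : pvHeadDigit r = false := hr ▸ pvHeadDigit_dropWhile cs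
          have hsplit : cs.splitOn '@' = (r.splitOn '@').modifyHead (u ++ ·) := by
            conv_lhs => rw [← hur]
            exact pvSplitOn_digits_append u r hudig
          obtain ⟨f0, rest0, hfr0⟩ := List.exists_cons_of_ne_nil (pvSplitOn_ne_nil r)
          have hdpl0 : pvDigitPrefixLen f0 = 0 := by
            have hh := pvDpl_head_splitOn r hrhead
            rw [hfr0] at hh; simpa using hh
          have hdpl : pvDigitPrefixLen (u ++ f0) = u.length := by
            rw [pvDigitPrefixLen_append u f0 hudig, hdpl0]
            omega
          rw [pvALoop, if_pos ⟨rfl, hd⟩, hscan]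
          rw [pvB_cons_at, hsplit, hfr0, List.modifyHead_cons]
          simp only [List.headI, List.tail]
          have hpiece : pvPiece (u ++ f0) = '<' :: '@' :: (u ++ '>' :: f0) := by
            rw [pvPiece]
            simp only [hdpl]
            rw [if_pos (by simpa using hune)]
            rw [List.take_left, List.drop_left]
          rw [hpiece, ih r hrlen, pvB, hfr0]
          simp
        · -- '@' followed by a non-digit (or end of string)
          rw [pvALoop, if_neg (by simp [hd]), ih cs hcs, pvB_cons_at]
          have hdpl0 := pvDpl_head_splitOn cs (by simpa using hd)
          have hpiece : pvPiece ((cs.splitOn '@').headI) = '@' :: (cs.splitOn '@').headI := by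
            rw [pvPiece]; simp [hdpl0]
          rw [hpiece, pvB]
          simp
      · -- ordinary character
        rw [pvALoop, if_neg (by simp [hc]), ih cs hcs, pvB_cons_ne c cs hc]

theorem pvAlt_eq_pvB (text : String) : mentionize_ids_py_alt text = String.ofList (pvB text.toList) := by
  obtain ⟨f, rest, hfr⟩ := List.exists_cons_of_ne_nil (pvSplitOn_ne_nil text.toList)
  rw [mentionize_ids_py_alt, hfr, pvB, hfr]
  simp only [PySem.List.foldl_append_eq_flatMap]
  simp

-- ===== VERDICT (by name: the statement is the Claim_ definition above) =====
theorem mentionize_ids_py_spec : Claim_equal_mentionize_ids_py := by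
  intro text _
  unfold Spec_mentionize_ids_py
  rw [pvAlt_eq_pvB, mentionize_ids_py, pvMain text.toList.length text.toList (le_refl _)]
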